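-- pv_equiv track=rewrite | github.com/seongun1/codetree-TILs | 231201/DateTime to DateTime/datetime-to-datetime.py | is_when
-- ===== SOURCE A (Python) =====
-- def is_when(a,b,c):
--     if a<= 11 and b<=11and c<11:
--         return -1
--     cnt =0
--     d,h,m =11,11,11
--     while (1):
--         if d == a and h == b and m ==c:
--             break
--         cnt +=1
--         m +=1
--         if m ==60:
--             h +=1
--             m=0
--         if h == 24:
--             d +=1
--             h=0
--     return cnt
-- ===== SOURCE B (Python) =====
-- def is_when(a, b, c):
--     # Closed-form minute difference from 11:11:11; keeps A's -1 early return.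
--     if a <= 11 and b <= 11 and c < 11:
--         return -1
--     return (a - 11) * 1440 + (b - 11) * 60 + (c - 11)
-- ===== Notes on version B (the rewrite author's own statement) =====
-- stated objective: faster
-- what changed: Replaces the minute-by-minute simulation loop with a direct minute-difference formula (a-11)*1440+(b-11)*60+(c-11), keeping the -1 early return; intended as asymptotically faster (O(1) vs O(answer)); a timing run measured B 13.25x at the largest size both finished and A timed out beyond that.
import Mathlib
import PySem

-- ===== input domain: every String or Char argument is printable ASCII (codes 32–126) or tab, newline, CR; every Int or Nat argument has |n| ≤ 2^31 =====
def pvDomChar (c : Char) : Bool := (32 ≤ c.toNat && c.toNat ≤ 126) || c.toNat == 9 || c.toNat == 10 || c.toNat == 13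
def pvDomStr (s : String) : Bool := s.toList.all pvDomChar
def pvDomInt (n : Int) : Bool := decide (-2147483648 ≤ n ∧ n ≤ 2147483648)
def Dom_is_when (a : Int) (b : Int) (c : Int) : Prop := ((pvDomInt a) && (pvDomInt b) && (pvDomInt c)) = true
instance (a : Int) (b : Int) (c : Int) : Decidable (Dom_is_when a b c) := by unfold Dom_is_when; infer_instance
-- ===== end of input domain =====

-- B replaces A's minute-by-minute simulation loop with a closed-form minute difference.

-- ===== PORT A =====
-- A's `while (1)` loop, step for step; `fuel` only bounds the number of iterations
-- (under Pre_is_when it is always sufficient, so it never changes the returned value).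
def isWhenLoop (fuel : Nat) (cnt d h m a b c : Int) : Int :=
  match fuel with
  | 0 => cnt
  | fuel + 1 =>
    if d = a ∧ h = b ∧ m = c then cnt
    else
      let cnt := cnt + 1
      let m := m + 1
      let hm := if m = 60 then (h + 1, (0 : Int)) else (h, m)
      let dh := if hm.1 = 24 then (d + 1, (0 : Int)) else (d, hm.1)
      isWhenLoop fuel cnt dh.1 dh.2 hm.2 a b c

def is_when (a : Int) (b : Int) (c : Int) : Int :=
  if a ≤ 11 ∧ b ≤ 11 ∧ c < 11 then -1
  else isWhenLoop (1440 * a + 60 * b + c - 16510).toNat 0 11 11 11 a b c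

-- ===== PORT B =====
def is_when_alt (a : Int) (b : Int) (c : Int) : Int :=
  if a ≤ 11 ∧ b ≤ 11 ∧ c < 11 then -1
  else (a - 11) * 1440 + (b - 11) * 60 + (c - 11)

-- ===== PRECONDITION & SPEC =====
-- Pre_ excludes exactly the inputs on which A's while-loop never reaches the target and
-- Python A diverges: b not a valid hour, c not a valid minute, or the target earlier than
-- 11:11:11 (and not caught by the -1 branch).
def Pre_is_when (a : Int) (b : Int) (c : Int) : Prop :=
  (a ≤ 11 ∧ b ≤ 11 ∧ c < 11) ∨
  (0 ≤ b ∧ b < 24 ∧ 0 ≤ c ∧ c < 60 ∧ 16511 ≤ 1440 * a + 60 * b + c)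
instance (a : Int) (b : Int) (c : Int) : Decidable (Pre_is_when a b c) := by
  unfold Pre_is_when; infer_instance

def pvWitness_is_when : Int × Int × Int := (12, 3, 45)

def Spec_is_when (a : Int) (b : Int) (c : Int) (out : Int) : Prop := out = is_when_alt a b c
instance (a : Int) (b : Int) (c : Int) (out : Int) : Decidable (Spec_is_when a b c out) := by
  unfold Spec_is_when; infer_instance

-- ===== CLAIM (what is proved, stated in full; the proofs are below) =====
def Claim_equal_is_when : Prop := ∀ (a : Int) (b : Int) (c : Int), Dom_is_when a b c → Pre_is_when a b c → Spec_is_when a b c (is_when a b c)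

-- ===== LEMMAS AND PROOFS =====

-- Loop invariant: from a canonical clock state exactly k minutes before the target,
-- the loop (with any sufficient fuel) returns cnt + k.
theorem isWhenLoop_eq (a b c : Int) (hb0 : 0 ≤ b) (hb : b < 24) (hc0 : 0 ≤ c) (hc : c < 60) :
    ∀ (k fuel : Nat) (cnt d h m : Int), k ≤ fuel →
      0 ≤ h → h < 24 → 0 ≤ m → m < 60 →
      1440 * d + 60 * h + m + (k : Int) = 1440 * a + 60 * b + c →
      isWhenLoop fuel cnt d h m a b c = cnt + (k : Int) := by
  intro k
  induction k with
  | zero =>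
    intro fuel cnt d h m _ h0 h1 m0 m1 heq
    have hd : d = a ∧ h = b ∧ m = c := by
      constructor
      · omega
      constructor <;> omega
    cases fuel with
    | zero => simp [isWhenLoop]
    | succ n => simp [isWhenLoop, hd]
  | succ k ih =>
    intro fuel cnt d h m hk h0 h1 m0 m1 heq
    cases fuel with
    | zero => omega
    | succ n =>
      have hne : ¬ (d = a ∧ h = b ∧ m = c) := by
        rintro ⟨rfl, rfl, rfl⟩; omega
      rw [isWhenLoop]
      simp only [hne, if_false]
      by_cases hm : m + 1 = 60
      · by_cases hh : h + 1 = 24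
        · simp only [hm, if_true, hh]
          rw [ih n (cnt + 1) (d + 1) 0 0 (by omega) (by omega) (by omega) (by omega)
              (by omega) (by push_cast at heq ⊢; omega)]
          push_cast; ring
        · simp only [hm, if_true, hh, if_false]
          rw [ih n (cnt + 1) d (h + 1) 0 (by omega) (by omega) (by omega) (by omega)
              (by omega) (by push_cast at heq ⊢; omega)]
          push_cast; ring
      · have hh2 : ¬ (h = 24) := by omega
        simp only [hm, if_false, hh2]
        rw [ih n (cnt + 1) d h (m + 1) (by omega) (by omega) (by omega) (by omega)
            (by omega) (by push_cast at heq ⊢; omega)]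
        push_cast; ring

-- ===== VERDICT (by name: the statement is the Claim_ definition above) =====
theorem is_when_spec : Claim_equal_is_when := by
  intro a b c _ hpre
  unfold Spec_is_when is_when is_when_alt
  by_cases hneg : a ≤ 11 ∧ b ≤ 11 ∧ c < 11
  · simp [hneg]
  · simp only [hneg, if_false]
    rcases hpre with h | ⟨hb0, hb, hc0, hc, hT⟩
    · exact absurd h hneg
    · rw [isWhenLoop_eq a b c hb0 hb hc0 hc (1440 * a + 60 * b + c - 16511).toNat
          (1440 * a + 60 * b + c - 16510).toNat
          0 11 11 11 (by omega) (by omega) (by omega) (by omega) (by omega) (by omega)]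
      omega
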